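-- pv_equiv track=rewrite | github.com/Protonk/sandbox-boostrap | book/api/profile_tools/sbpl_scan.py | _tokenize_sbpl
-- ===== SOURCE A (Python) =====
-- from typing import Any, Dict, List, Optional, Sequence, Tuple, Union
--
-- def _tokenize_sbpl(text: str) -> List[str]:
--     tokens: List[str] = []
--     i = 0
--     n = len(text)
--
--     while i < n:
--         ch = text[i]
--
--         # whitespace
--         if ch.isspace():
--             i += 1
--             continue
--
--         # line comment
--         if ch == ";":
--             while i < n and text[i] != "\n":
--                 i += 1
--             continue
--
--         # block comment (#| ... |#)
--         if text.startswith("#|", i):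
--             end = text.find("|#", i + 2)
--             if end == -1:
--                 # Unterminated block comment: treat remainder as comment.
--                 break
--             i = end + 2
--             continue
--
--         if ch == "(" or ch == ")":
--             tokens.append(ch)
--             i += 1
--             continue
--
--         # string literal
--         if ch == '"':
--             start = i
--             i += 1
--             while i < n:
--                 if text[i] == "\\":
--                     i += 2
--                     continue
--                 if text[i] == '"':
--                     i += 1
--                     break
--                 i += 1
--             tokens.append(text[start:i])
--             continue
--
--         # atom
--         start = i
--         while i < n:
--             ch2 = text[i]
--             if ch2.isspace() or ch2 in ("(", ")", ";"):
--                 break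
--             if text.startswith("#|", i):
--                 break
--             i += 1
--         if start == i:
--             # Defensive: avoid infinite loops on unexpected chars.
--             i += 1
--             continue
--         tokens.append(text[start:i])
--
--     return tokens
-- ===== SOURCE B (Python) =====
-- from typing import List
--
-- def _tokenize_sbpl(text: str) -> List[str]:
--     # Single-pass DFA: one state machine consuming one character per step,
--     # accumulating the current atom/string in a buffer (no index arithmetic,
--     # no inner scanning loops).
--     tokens: List[str] = []
--     buf: List[str] = []
--     state = "top"  # top | line | blockstart | block | blockpipe | string | escape
--     n = len(text)
--     for i, ch in enumerate(text):
--         if state == "line":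
--             if ch == "\n":
--                 state = "top"
--             continue
--         if state == "blockstart":
--             state = "block"
--             continue
--         if state == "block":
--             if ch == "|":
--                 state = "blockpipe"
--             continue
--         if state == "blockpipe":
--             if ch == "#":
--                 state = "top"
--             elif ch != "|":
--                 state = "block"
--             continue
--         if state == "escape":
--             buf.append(ch)
--             state = "string"
--             continue
--         if state == "string":
--             buf.append(ch)
--             if ch == "\\":
--                 state = "escape"
--             elif ch == '"':
--                 tokens.append("".join(buf))
--                 buf = []
--                 state = "top"
--             continue
--         # state == "top" (possibly inside an atom when buf is non-empty)
--         nxt = text[i + 1] if i + 1 < n else ""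
--         if ch == "#" and nxt == "|":
--             if buf:
--                 tokens.append("".join(buf))
--                 buf = []
--             state = "blockstart"
--         elif ch.isspace():
--             if buf:
--                 tokens.append("".join(buf))
--                 buf = []
--         elif ch == "(" or ch == ")":
--             if buf:
--                 tokens.append("".join(buf))
--                 buf = []
--             tokens.append(ch)
--         elif ch == ";":
--             if buf:
--                 tokens.append("".join(buf))
--                 buf = []
--             state = "line"
--         elif ch == '"' and not buf:
--             buf.append(ch)
--             state = "string"
--         else:
--             buf.append(ch)
--     if state in ("top", "string", "escape") and buf:
--         tokens.append("".join(buf))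
--     return tokens
-- ===== Notes on version B (the rewrite author's own statement) =====
-- stated objective: alternative
-- what changed: Replaced A's index-advancing scanner with four inner while-loops and slicing by a single-pass character DFA (explicit state for line/block comment, string, escape) that buffers the current token and emits it at each delimiter, consuming exactly one character per step.
import Mathlib
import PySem

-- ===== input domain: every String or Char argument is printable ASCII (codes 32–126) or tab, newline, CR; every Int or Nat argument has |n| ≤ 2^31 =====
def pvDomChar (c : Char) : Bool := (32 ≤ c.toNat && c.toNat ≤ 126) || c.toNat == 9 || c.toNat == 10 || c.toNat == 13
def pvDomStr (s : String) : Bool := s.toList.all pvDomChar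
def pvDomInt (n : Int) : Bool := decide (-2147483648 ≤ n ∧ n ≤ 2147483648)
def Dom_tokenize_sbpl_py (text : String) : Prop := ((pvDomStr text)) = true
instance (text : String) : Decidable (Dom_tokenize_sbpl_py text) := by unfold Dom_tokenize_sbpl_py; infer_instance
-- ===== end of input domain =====

-- B replaces A's hand-advanced index scanner (with its four inner while-loops) by a
-- single-pass DFA consuming one character per step and buffering the current token —
-- objective: alternative decomposition. Proved equal on ALL strings (A is total).

-- ===== PORT A =====  (literal transliteration of the while-loop scanner)

-- text[i] (A only reads in-range indices; default never observed)
def pvAt (cs : List Char) (i : Nat) : Char := cs.getD i ' '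

-- text[a:b] on the char list
def pvSlice (cs : List Char) (a b : Nat) : String := String.ofList ((cs.drop a).take (b - a))

-- text.startswith("#|", i)  (true only when the two chars fit)
def pvHashPipe (cs : List Char) (i : Nat) : Bool :=
  decide (i + 2 ≤ cs.length) && (pvAt cs i == '#') && (pvAt cs (i+1) == '|')

-- inner `while i < n and text[i] != "\n": i += 1` of the line-comment branch
def skipSemiA (cs : List Char) (i : Nat) : Nat :=
  if i < cs.length then
    if pvAt cs i ≠ '\n' then skipSemiA cs (i+1) else i
  else i
termination_by cs.length - i
decreasing_by exact Nat.sub_lt_sub_left (by assumption) (Nat.lt_succ_self _)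

-- text.find("|#", j) : first j' ≥ j with "|#" at j', as an Option (none = -1)
def findPipeHashA (cs : List Char) (j : Nat) : Option Nat :=
  if j + 2 ≤ cs.length then
    if pvAt cs j = '|' ∧ pvAt cs (j+1) = '#' then some j
    else findPipeHashA cs (j+1)
  else none
termination_by cs.length - j
decreasing_by exact Nat.sub_lt_sub_left (Nat.lt_of_lt_of_le (Nat.lt_succ_of_lt (Nat.lt_succ_self _)) (by assumption)) (Nat.lt_succ_self _)

-- inner string-literal loop of A, starting just after the opening quote
def strEndA (cs : List Char) (i : Nat) : Nat :=
  if i < cs.length then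
    if pvAt cs i = '\\' then strEndA cs (i+2)
    else if pvAt cs i = '"' then i + 1
    else strEndA cs (i+1)
  else i
termination_by cs.length - i
decreasing_by all_goals
  first
  | exact Nat.sub_lt_sub_left (by assumption) (Nat.lt_succ_self _)
  | exact Nat.sub_lt_sub_left (by assumption) (Nat.lt_succ_of_lt (Nat.lt_succ_self _))

-- inner atom loop of A
def atomEndA (cs : List Char) (i : Nat) : Nat :=
  if i < cs.length then
    if PySem.Chars.isspace (pvAt cs i) ∨ pvAt cs i = '(' ∨ pvAt cs i = ')'
        ∨ pvAt cs i = ';' then i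
    else if pvHashPipe cs i then i
    else atomEndA cs (i+1)
  else i
termination_by cs.length - i
decreasing_by exact Nat.sub_lt_sub_left (by assumption) (Nat.lt_succ_self _)

theorem skipSemiA_ge (cs : List Char) (i : Nat) : i ≤ skipSemiA cs i := by
  rw [skipSemiA]
  split
  · split
    · exact le_trans (Nat.le_succ i) (skipSemiA_ge cs (i+1))
    · exact le_refl i
  · exact le_refl i
termination_by cs.length - i
decreasing_by exact Nat.sub_lt_sub_left (by assumption) (Nat.lt_succ_self _)

theorem findPipeHashA_ge (cs : List Char) (j e : Nat) (h : findPipeHashA cs j = some e) :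
    j ≤ e := by
  rw [findPipeHashA] at h
  split at h
  · split at h
    · cases h; exact le_refl _
    · exact le_trans (Nat.le_succ j) (findPipeHashA_ge cs (j+1) e h)
  · cases h
termination_by cs.length - j
decreasing_by exact Nat.sub_lt_sub_left (Nat.lt_of_lt_of_le (Nat.lt_succ_of_lt (Nat.lt_succ_self _)) (by assumption)) (Nat.lt_succ_self _)

theorem strEndA_ge (cs : List Char) (i : Nat) : i ≤ strEndA cs i := by
  rw [strEndA]
  split
  · split
    · exact le_trans (by omega) (strEndA_ge cs (i+2))
    · split
      · omega
      · exact le_trans (Nat.le_succ i) (strEndA_ge cs (i+1))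
  · exact le_refl i
termination_by cs.length - i
decreasing_by all_goals
  first
  | exact Nat.sub_lt_sub_left (by assumption) (Nat.lt_succ_self _)
  | exact Nat.sub_lt_sub_left (by assumption) (Nat.lt_succ_of_lt (Nat.lt_succ_self _))

theorem atomEndA_ge (cs : List Char) (i : Nat) : i ≤ atomEndA cs i := by
  rw [atomEndA]
  split
  · split
    · exact le_refl i
    · split
      · exact le_refl i
      · exact le_trans (Nat.le_succ i) (atomEndA_ge cs (i+1))
  · exact le_refl i
termination_by cs.length - i
decreasing_by exact Nat.sub_lt_sub_left (by assumption) (Nat.lt_succ_self _)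

-- the main `while i < n` loop of A
def loopA (cs : List Char) (i : Nat) (acc : List String) : List String :=
  if hi : i < cs.length then
    if PySem.Chars.isspace (pvAt cs i) then loopA cs (i+1) acc
    else if hsemi : pvAt cs i = ';' then loopA cs (skipSemiA cs i) acc
    else if pvHashPipe cs i then
      match hf : findPipeHashA cs (i+2) with
      | none => acc                      -- unterminated block comment: break
      | some e => loopA cs (e+2) acc
    else if pvAt cs i = '(' ∨ pvAt cs i = ')' then
      loopA cs (i+1) (acc ++ [String.ofList [pvAt cs i]])
    else if pvAt cs i = '"' then
      loopA cs (strEndA cs (i+1)) (acc ++ [pvSlice cs i (strEndA cs (i+1))])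
    else
      if i = atomEndA cs i then loopA cs (i+1) acc   -- defensive branch of A
      else loopA cs (atomEndA cs i) (acc ++ [pvSlice cs i (atomEndA cs i)])
  else acc
termination_by cs.length - i
decreasing_by
  · exact Nat.sub_lt_sub_left hi (Nat.lt_succ_self _)
  · have h2 : skipSemiA cs i = skipSemiA cs (i+1) := by
      rw [skipSemiA, if_pos hi, if_pos (by rw [hsemi]; decide)]
    rw [h2]
    exact Nat.sub_lt_sub_left hi (Nat.lt_of_succ_le (skipSemiA_ge cs (i+1)))
  · exact Nat.sub_lt_sub_left hi (Nat.lt_of_succ_le (le_trans (Nat.le_succ (i+1))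
      (le_trans (findPipeHashA_ge cs (i+2) e hf) (Nat.le_add_right e 2))))
  · exact Nat.sub_lt_sub_left hi (Nat.lt_succ_self _)
  · exact Nat.sub_lt_sub_left hi (Nat.lt_of_succ_le (strEndA_ge cs (i+1)))
  · exact Nat.sub_lt_sub_left hi (Nat.lt_succ_self _)
  · exact Nat.sub_lt_sub_left hi (Nat.lt_of_le_of_ne (atomEndA_ge cs i) (by assumption))

def tokenize_sbpl_py (text : String) : List String := loopA text.toList 0 []

-- ===== PORT B =====  (the single-pass DFA of Source B: one state per comment/string mode,
-- a char buffer for the current token, one character consumed per step; the only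
-- lookahead is rest.head? — Source B's `text[i+1]` peek)

inductive ScanState : Type
  | top | line | blockstart | block | blockpipe | instr | esc
deriving DecidableEq, Repr

-- flush of a pending buffer (Source B's `if buf: tokens.append("".join(buf))`)
def flushB (tokens : List String) (buf : List Char) : List String :=
  if buf.isEmpty then tokens else tokens ++ [String.ofList buf]

-- the `for i, ch in enumerate(text)` loop, one step per character
def runB (tokens : List String) (buf : List Char) (s : ScanState) : List Char → List String
  | [] =>
    match s with
    | .top | .instr | .esc => flushB tokens buf
    | _ => tokens
  | c :: rest =>
    match s with
    | .line => if c = '\n' then runB tokens buf .top rest else runB tokens buf .line rest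
    | .blockstart => runB tokens buf .block rest
    | .block => if c = '|' then runB tokens buf .blockpipe rest else runB tokens buf .block rest
    | .blockpipe =>
      if c = '#' then runB tokens buf .top rest
      else if c = '|' then runB tokens buf .blockpipe rest
      else runB tokens buf .block rest
    | .esc => runB tokens (buf ++ [c]) .instr rest
    | .instr =>
      if c = '\\' then runB tokens (buf ++ [c]) .esc rest
      else if c = '"' then runB (tokens ++ [String.ofList (buf ++ [c])]) [] .top rest
      else runB tokens (buf ++ [c]) .instr rest
    | .top =>
      if c = '#' ∧ rest.head? = some '|' then runB (flushB tokens buf) [] .blockstart rest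
      else if PySem.Chars.isspace c then runB (flushB tokens buf) [] .top rest
      else if c = '(' ∨ c = ')' then
        runB (flushB tokens buf ++ [String.ofList [c]]) [] .top rest
      else if c = ';' then runB (flushB tokens buf) [] .line rest
      else if c = '"' ∧ buf.isEmpty then runB tokens [c] .instr rest
      else runB tokens (buf ++ [c]) .top rest

def tokenize_sbpl_py_alt (text : String) : List String := runB [] [] .top text.toList

-- ===== PRECONDITION & SPEC =====
def Spec_tokenize_sbpl_py (text : String) (out : List String) : Prop := out = tokenize_sbpl_py_alt text
instance (text : String) (out : List String) : Decidable (Spec_tokenize_sbpl_py text out) := by unfold Spec_tokenize_sbpl_py; infer_instance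

-- ===== CLAIM (what is proved, stated in full; the proofs are below) =====
def Claim_equal_tokenize_sbpl_py : Prop := ∀ (text : String), Dom_tokenize_sbpl_py text → Spec_tokenize_sbpl_py text (tokenize_sbpl_py text)

-- ===== LEMMAS AND PROOFS =====

-- dropping at an in-range index exposes the head character
theorem dropD (cs : List Char) (j : Nat) (h : j < cs.length) :
    cs.drop j = pvAt cs j :: cs.drop (j+1) := by
  rw [List.drop_eq_getElem_cons h]
  simp [pvAt, List.getD, List.getElem?_eq_getElem h]

-- take through one / two exposed cons cells (definitional)
theorem take_cons1 (c1 : Char) (l : List Char) (m : Nat) :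
    List.take (m + 1) (c1 :: l) = c1 :: List.take m l := rfl

theorem take_cons2 (c1 c2 : Char) (l : List Char) (m : Nat) :
    List.take (m + 2) (c1 :: c2 :: l) = c1 :: c2 :: List.take m l := rfl

-- flushB on an empty / non-empty buffer
theorem flushB_nil (t : List String) : flushB t [] = t := rfl

theorem flushB_ne (t : List String) (buf : List Char) (hb : buf ≠ []) :
    flushB t buf = t ++ [String.ofList buf] := by simp [flushB, hb]

-- A's startswith("#|", i) test said on B's peeked shape
theorem hashPipe_iff (cs : List Char) (i : Nat) (h : i < cs.length) :
    pvHashPipe cs i = true ↔ (pvAt cs i = '#' ∧ (cs.drop (i+1)).head? = some '|') := by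
  unfold pvHashPipe
  constructor
  · intro hp
    simp only [Bool.and_eq_true, beq_iff_eq, decide_eq_true_eq] at hp
    obtain ⟨⟨hle, h1⟩, h2⟩ := hp
    refine ⟨h1, ?_⟩
    rw [dropD cs (i+1) (by omega)]
    simp [h2]
  · intro ⟨h1, h2⟩
    have h1' : i + 1 < cs.length := by
      by_contra hc
      rw [List.drop_eq_nil_of_le (by omega)] at h2
      simp at h2
    rw [dropD cs (i+1) h1'] at h2
    simp only [List.head?_cons, Option.some.injEq] at h2
    simp [h1, h2]; omega

-- B's line state = A's inner line-comment loop
theorem line_run (cs : List Char) (j : Nat) (t : List String) :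
    runB t [] .line (cs.drop j) = runB t [] .top (cs.drop (skipSemiA cs j)) := by
  by_cases hj : j < cs.length
  · rw [dropD cs j hj]
    by_cases hn : pvAt cs j = '\n'
    · have hs : skipSemiA cs j = j := by
        rw [skipSemiA, if_pos hj, if_neg (by simp [hn])]
      rw [hs, dropD cs j hj]
      simp only [runB, if_pos hn]
      have hnh : ¬ (pvAt cs j = '#' ∧ (cs.drop (j+1)).head? = some '|') := by
        rintro ⟨hc, -⟩; rw [hn] at hc; exact absurd hc (by decide)
      rw [if_neg hnh, if_pos (by rw [hn]; decide)]
      rfl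
    · have hs : skipSemiA cs j = skipSemiA cs (j+1) := by
        rw [skipSemiA, if_pos hj, if_pos hn]
      simp only [runB, if_neg hn]
      rw [hs]
      exact line_run cs (j+1) t
  · rw [List.drop_eq_nil_of_le (by omega),
      show skipSemiA cs j = j from by rw [skipSemiA, if_neg hj],
      List.drop_eq_nil_of_le (by omega)]
    rfl
termination_by cs.length - j
decreasing_by exact Nat.sub_lt_sub_left (by assumption) (Nat.lt_succ_self _)

-- find("|#") never succeeds out of range
theorem find_oob (cs : List Char) (j : Nat) (h : ¬ j + 2 ≤ cs.length) :
    findPipeHashA cs j = none := by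
  rw [findPipeHashA, if_neg h]

-- B's block/blockpipe states = A's text.find("|#", ·) search
theorem block_run (cs : List Char) (j : Nat) (t : List String) :
    runB t [] .block (cs.drop j) =
      (match findPipeHashA cs j with
       | some e => runB t [] .top (cs.drop (e+2))
       | none => t) := by
  by_cases hj : j < cs.length
  · rw [dropD cs j hj]
    by_cases hp : pvAt cs j = '|'
    · simp only [runB, if_pos hp]
      by_cases hj1 : j + 1 < cs.length
      · rw [dropD cs (j+1) hj1]
        by_cases hh : pvAt cs (j+1) = '#'
        · simp only [runB, if_pos hh]
          rw [findPipeHashA, if_pos (by omega), if_pos ⟨hp, hh⟩]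
        · have hfind : findPipeHashA cs j = findPipeHashA cs (j+1) := by
            rw [findPipeHashA, if_pos (by omega),
              if_neg (by rintro ⟨-, hc⟩; exact hh hc)]
          rw [hfind]
          by_cases hpp : pvAt cs (j+1) = '|'
          · simp only [runB, if_neg hh, if_pos hpp]
            have := block_run cs (j+1) t
            rw [dropD cs (j+1) hj1] at this
            simp only [runB, if_pos hpp] at this
            exact this
          · simp only [runB, if_neg hh, if_neg hpp]
            have hfind2 : findPipeHashA cs (j+1) = findPipeHashA cs (j+2) := by
              by_cases h3 : j + 3 ≤ cs.length
              · rw [findPipeHashA, if_pos h3,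
                  if_neg (by rintro ⟨hc, -⟩; exact hpp hc)]
              · rw [find_oob cs (j+1) (by omega), find_oob cs (j+2) (by omega)]
            rw [hfind2]
            exact block_run cs (j+2) t
      · rw [List.drop_eq_nil_of_le (by omega), find_oob cs j (by omega)]
        rfl
    · simp only [runB, if_neg hp]
      have hfind : findPipeHashA cs j = findPipeHashA cs (j+1) := by
        by_cases h2 : j + 2 ≤ cs.length
        · rw [findPipeHashA, if_pos h2, if_neg (by rintro ⟨hc, -⟩; exact hp hc)]
        · rw [find_oob cs j h2, find_oob cs (j+1) (by omega)]
      rw [hfind]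
      exact block_run cs (j+1) t
  · rw [List.drop_eq_nil_of_le (by omega), find_oob cs j (by omega)]
    rfl
termination_by cs.length - j
decreasing_by all_goals omega

-- B's string/escape states = A's inner string-literal loop
theorem str_run (cs : List Char) (j : Nat) (buf : List Char) (t : List String)
    (hb : buf ≠ []) :
    runB t buf .instr (cs.drop j) =
      runB (t ++ [String.ofList (buf ++ (cs.drop j).take (strEndA cs j - j))]) []
        .top (cs.drop (strEndA cs j)) := by
  by_cases hj : j < cs.length
  · by_cases hbsl : pvAt cs j = '\\'
    · have hE : strEndA cs j = strEndA cs (j+2) := by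
        rw [strEndA, if_pos hj, if_pos hbsl]
      by_cases hj1 : j + 1 < cs.length
      · have hE2 : j + 2 ≤ strEndA cs (j+2) := strEndA_ge cs (j+2)
        rw [hE, dropD cs j hj, dropD cs (j+1) hj1,
          show strEndA cs (j+2) - j = (strEndA cs (j+2) - (j+2)) + 2 from by omega,
          take_cons2]
        simp only [runB, if_pos hbsl]
        rw [str_run cs (j+2) (buf ++ [pvAt cs j] ++ [pvAt cs (j+1)]) t (by simp)]
        simp
      · -- lone trailing backslash: A steps to j+2 past the end; the slice clamps
        have hlen : cs.length = j + 1 := by omega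
        have hE2 : strEndA cs (j+2) = j + 2 := by
          rw [strEndA, if_neg (by omega)]
        rw [hE, hE2, dropD cs j hj,
          List.drop_eq_nil_of_le (show cs.length ≤ j + 1 from by omega),
          List.drop_eq_nil_of_le (show cs.length ≤ j + 2 from by omega),
          show j + 2 - j = 2 from by omega]
        simp [runB, flushB, hb]
    · by_cases hq : pvAt cs j = '"'
      · have hE : strEndA cs j = j + 1 := by
          rw [strEndA, if_pos hj, if_neg hbsl, if_pos hq]
        rw [hE, dropD cs j hj, show j + 1 - j = 1 from by omega, take_cons1]
        simp only [runB, if_neg hbsl, if_pos hq]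
        simp
      · have hE : strEndA cs j = strEndA cs (j+1) := by
          rw [strEndA, if_pos hj, if_neg hbsl, if_neg hq]
        have hE2 : j + 1 ≤ strEndA cs (j+1) := strEndA_ge cs (j+1)
        rw [hE, dropD cs j hj,
          show strEndA cs (j+1) - j = (strEndA cs (j+1) - (j+1)) + 1 from by omega,
          take_cons1]
        simp only [runB, if_neg hbsl, if_neg hq]
        rw [str_run cs (j+1) (buf ++ [pvAt cs j]) t (by simp)]
        simp
  · have hE : strEndA cs j = j := by rw [strEndA, if_neg hj]
    rw [List.drop_eq_nil_of_le (show cs.length ≤ j from by omega), hE,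
      List.drop_eq_nil_of_le (show cs.length ≤ j from by omega)]
    simp [runB, flushB, hb]
termination_by cs.length - j
decreasing_by all_goals omega

-- B's top state with a pending buffer = A's inner atom loop
theorem atom_run (cs : List Char) (j : Nat) (buf : List Char) (t : List String)
    (hb : buf ≠ []) :
    runB t buf .top (cs.drop j) =
      runB (t ++ [String.ofList (buf ++ (cs.drop j).take (atomEndA cs j - j))]) []
        .top (cs.drop (atomEndA cs j)) := by
  by_cases hj : j < cs.length
  · by_cases hhp : pvHashPipe cs j = true
    · have hE : atomEndA cs j = j := by
        rw [atomEndA, if_pos hj]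
        by_cases hbr : PySem.Chars.isspace (pvAt cs j) = true ∨ pvAt cs j = '('
            ∨ pvAt cs j = ')' ∨ pvAt cs j = ';'
        · rw [if_pos hbr]
        · rw [if_neg hbr, if_pos hhp]
      obtain ⟨h1, h2⟩ := (hashPipe_iff cs j hj).mp hhp
      rw [hE, Nat.sub_self, List.take_zero, List.append_nil, dropD cs j hj]
      simp only [runB, if_pos (⟨h1, h2⟩ : _ ∧ _)]
      rw [flushB_ne t buf hb, flushB_nil]
    · have hnc : ¬ (pvAt cs j = '#' ∧ (cs.drop (j+1)).head? = some '|') :=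
        fun hc => hhp ((hashPipe_iff cs j hj).mpr hc)
      by_cases hws : PySem.Chars.isspace (pvAt cs j) = true
      · have hE : atomEndA cs j = j := by
          rw [atomEndA, if_pos hj, if_pos (Or.inl hws)]
        rw [hE, Nat.sub_self, List.take_zero, List.append_nil, dropD cs j hj]
        simp only [runB, if_neg hnc, if_pos hws]
        rw [flushB_ne t buf hb, flushB_nil]
      · by_cases hpar : pvAt cs j = '(' ∨ pvAt cs j = ')'
        · have hE : atomEndA cs j = j := by
            rw [atomEndA, if_pos hj, if_pos (by tauto)]
          rw [hE, Nat.sub_self, List.take_zero, List.append_nil, dropD cs j hj]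
          simp only [runB, if_neg hnc, if_neg hws, if_pos hpar]
          rw [flushB_ne t buf hb, flushB_nil]
        · by_cases hsemi : pvAt cs j = ';'
          · have hE : atomEndA cs j = j := by
              rw [atomEndA, if_pos hj, if_pos (by tauto)]
            rw [hE, Nat.sub_self, List.take_zero, List.append_nil, dropD cs j hj]
            simp only [runB, if_neg hnc, if_neg hws, if_neg hpar, if_pos hsemi]
            rw [flushB_ne t buf hb, flushB_nil]
          · have hE : atomEndA cs j = atomEndA cs (j+1) := by
              rw [atomEndA, if_pos hj, if_neg (by tauto), if_neg hhp]
            have hE2 : j + 1 ≤ atomEndA cs (j+1) := atomEndA_ge cs (j+1)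
            have hnq : ¬ (pvAt cs j = '"' ∧ buf.isEmpty = true) := by
              rintro ⟨-, hc⟩; simp at hc; exact hb hc
            rw [hE, dropD cs j hj,
              show atomEndA cs (j+1) - j = (atomEndA cs (j+1) - (j+1)) + 1 from by omega,
              take_cons1]
            simp only [runB, if_neg hnc, if_neg hws, if_neg hpar, if_neg hsemi,
              if_neg hnq]
            rw [atom_run cs (j+1) (buf ++ [pvAt cs j]) t (by simp)]
            simp
  · have hE : atomEndA cs j = j := by rw [atomEndA, if_neg hj]
    rw [List.drop_eq_nil_of_le (show cs.length ≤ j from by omega), hE,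
      List.drop_eq_nil_of_le (show cs.length ≤ j from by omega)]
    simp [runB, flushB, hb]
termination_by cs.length - j
decreasing_by all_goals omega

-- MAIN LEMMA: A's scanner loop = B's DFA from any position (empty buffer, top state)
theorem loop_eq (cs : List Char) (i : Nat) (acc : List String) :
    loopA cs i acc = runB acc [] .top (cs.drop i) := by
  by_cases hi : i < cs.length
  case neg =>
    rw [loopA, dif_neg hi, List.drop_eq_nil_of_le (show cs.length ≤ i from by omega)]
    rfl
  case pos =>
  by_cases hws : PySem.Chars.isspace (pvAt cs i) = true
  · -- whitespace: both sides step one character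
    have hnc : ¬ (pvAt cs i = '#' ∧ (cs.drop (i+1)).head? = some '|') := by
      rintro ⟨hc, -⟩
      rw [hc] at hws; exact absurd hws (by decide)
    rw [loopA, dif_pos hi, if_pos hws, dropD cs i hi]
    simp only [runB, if_neg hnc, if_pos hws]
    rw [flushB_nil]
    exact loop_eq cs (i+1) acc
  · by_cases hsemi : pvAt cs i = ';'
    · -- line comment
      have hnc : ¬ (pvAt cs i = '#' ∧ (cs.drop (i+1)).head? = some '|') := by
        rintro ⟨hc, -⟩; rw [hsemi] at hc; exact absurd hc (by decide)
      have hnp : ¬ (pvAt cs i = '(' ∨ pvAt cs i = ')') := by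
        rintro (hc | hc) <;> rw [hsemi] at hc <;> exact absurd hc (by decide)
      have hs : skipSemiA cs i = skipSemiA cs (i+1) := by
        rw [skipSemiA, if_pos hi, if_pos (by rw [hsemi]; decide)]
      rw [loopA, dif_pos hi, if_neg hws, dif_pos hsemi, dropD cs i hi]
      simp only [runB, if_neg hnc, if_neg hws, if_neg hnp, if_pos hsemi]
      rw [flushB_nil, line_run cs (i+1) acc, hs]
      exact loop_eq cs (skipSemiA cs (i+1)) acc
    · by_cases hhp : pvHashPipe cs i = true
      · -- block comment
        obtain ⟨h1, h2⟩ := (hashPipe_iff cs i hi).mp hhp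
        have hi1 : i + 1 < cs.length := by
          unfold pvHashPipe at hhp
          simp only [Bool.and_eq_true, decide_eq_true_eq] at hhp
          omega
        rw [loopA, dif_pos hi, if_neg hws, dif_neg hsemi, if_pos hhp, dropD cs i hi]
        simp only [runB, if_pos (⟨h1, h2⟩ : _ ∧ _)]
        rw [flushB_nil, dropD cs (i+1) hi1]
        simp only [runB]
        rw [show i + 1 + 1 = i + 2 from rfl, block_run cs (i+2) acc]
        cases hf : findPipeHashA cs (i+2) with
        | none => rfl
        | some e =>
          simp only []
          exact loop_eq cs (e+2) acc
      · by_cases hpar : pvAt cs i = '(' ∨ pvAt cs i = ')'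
        · -- paren
          have hnc : ¬ (pvAt cs i = '#' ∧ (cs.drop (i+1)).head? = some '|') := by
            rintro ⟨hc, -⟩
            rcases hpar with hp | hp <;> rw [hp] at hc <;> exact absurd hc (by decide)
          rw [loopA, dif_pos hi, if_neg hws, dif_neg hsemi, if_neg hhp, if_pos hpar,
            dropD cs i hi]
          simp only [runB, if_neg hnc, if_neg hws, if_pos hpar]
          rw [flushB_nil]
          exact loop_eq cs (i+1) (acc ++ [String.ofList [pvAt cs i]])
        · by_cases hq : pvAt cs i = '"'
          · -- string literal
            have hnc : ¬ (pvAt cs i = '#' ∧ (cs.drop (i+1)).head? = some '|') := by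
              rintro ⟨hc, -⟩; rw [hq] at hc; exact absurd hc (by decide)
            have hE : i + 1 ≤ strEndA cs (i+1) := strEndA_ge cs (i+1)
            rw [loopA, dif_pos hi, if_neg hws, dif_neg hsemi, if_neg hhp, if_neg hpar,
              if_pos hq]
            unfold pvSlice
            rw [dropD cs i hi,
              show strEndA cs (i+1) - i = (strEndA cs (i+1) - (i+1)) + 1 from by omega,
              take_cons1]
            have hB : runB acc [] ScanState.top (pvAt cs i :: cs.drop (i+1))
                = runB acc [pvAt cs i] ScanState.instr (cs.drop (i+1)) := by
              simp [runB, hq]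
              intro hc
              exact absurd hc (by decide)
            rw [hB, str_run cs (i+1) [pvAt cs i] acc (by simp),
              loop_eq cs (strEndA cs (i+1)) _]
            simp
          · -- atom
            have hnc : ¬ (pvAt cs i = '#' ∧ (cs.drop (i+1)).head? = some '|') :=
              fun hc => hhp ((hashPipe_iff cs i hi).mpr hc)
            have hnq : ¬ (pvAt cs i = '"' ∧ (List.nil (α := Char)).isEmpty = true) := by
              rintro ⟨hc, -⟩; exact hq hc
            have hAe : atomEndA cs i = atomEndA cs (i+1) := by
              rw [atomEndA, if_pos hi, if_neg (by tauto), if_neg hhp]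
            have hE2 : i + 1 ≤ atomEndA cs (i+1) := atomEndA_ge cs (i+1)
            have hne : ¬ i = atomEndA cs i := by omega
            rw [loopA, dif_pos hi, if_neg hws, dif_neg hsemi, if_neg hhp, if_neg hpar,
              if_neg hq, if_neg hne]
            unfold pvSlice
            rw [hAe, dropD cs i hi,
              show atomEndA cs (i+1) - i = (atomEndA cs (i+1) - (i+1)) + 1 from by omega,
              take_cons1]
            simp only [runB, if_neg hnc, if_neg hws, if_neg hpar, if_neg hsemi,
              if_neg hnq, List.nil_append]
            rw [atom_run cs (i+1) [pvAt cs i] acc (by simp),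
              loop_eq cs (atomEndA cs (i+1)) _]
            simp
termination_by cs.length - i
decreasing_by all_goals
  first
  | omega
  | (exact Nat.sub_lt_sub_left hi (Nat.lt_of_succ_le (le_trans (by omega) (skipSemiA_ge cs (i+1)))))
  | (exact Nat.sub_lt_sub_left hi (Nat.lt_of_succ_le (le_trans (by omega)
      (le_trans (findPipeHashA_ge cs (i+2) e hf) (by omega)))))

-- ===== VERDICT (by name: the statement is the Claim_ definition above) =====
theorem tokenize_sbpl_py_spec : Claim_equal_tokenize_sbpl_py := by
  intro text _
  unfold Spec_tokenize_sbpl_py tokenize_sbpl_py tokenize_sbpl_py_alt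
  have := loop_eq text.toList 0 []
  simpa using this
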